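-- pv_equiv track=rewrite | github.com/adelabdelgawad/support-center | src/backend/api/services/active_directory.py | _prune_covered_ous
-- ===== SOURCE A (Python) =====
-- from typing import List, Optional, Tuple
--
-- def _prune_covered_ous(targets: List[Tuple[str, str]]) -> List[Tuple[str, str]]:
--     """
--     Remove OUs whose DN is already under another selected OU.
--
--     Since each OU uses SUBTREE search, a parent OU already covers all its
--     children. E.g. if both "OU=SMH,DC=..." and "OU=IT,OU=SMH,DC=..." are
--     selected, the IT one is redundant because the SMH SUBTREE covers it.
--     """
--     # Use case-insensitive comparison since LDAP DNs are case-insensitive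
--     target_dns = {dn.lower() for dn, _ in targets}
--     pruned = []
--     for dn, sn in targets:
--         dn_lower = dn.lower()
--         is_covered = any(
--             dn_lower != other_dn and dn_lower.endswith("," + other_dn)
--             for other_dn in target_dns
--         )
--         if not is_covered:
--             pruned.append((dn, sn))
--     return pruned
-- ===== SOURCE B (Python) =====
-- from typing import List, Tuple
--
--
-- def _covered(low: str, dn_set) -> bool:
--     # walk the DN once; at each comma, the text after it is a candidate ancestor DN
--     for i, ch in enumerate(low):
--         if ch == ',' and low[i + 1:] in dn_set:
--             return True
--     return False
--
--
-- def _prune_covered_ous(targets: List[Tuple[str, str]]) -> List[Tuple[str, str]]: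
--     dn_set = {dn.lower() for dn, _ in targets}
--     return [(dn, sn) for dn, sn in targets if not _covered(dn.lower(), dn_set)]
-- ===== Notes on version B (the rewrite author's own statement) =====
-- stated objective: alternative
-- what changed: Instead of testing every DN against every other DN in the set with endswith (all-pairs), B scans each lowered DN once and probes only its comma-boundary suffixes for membership in a hash set of all lowered DNs, which has better worst-case complexity.
import Mathlib
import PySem

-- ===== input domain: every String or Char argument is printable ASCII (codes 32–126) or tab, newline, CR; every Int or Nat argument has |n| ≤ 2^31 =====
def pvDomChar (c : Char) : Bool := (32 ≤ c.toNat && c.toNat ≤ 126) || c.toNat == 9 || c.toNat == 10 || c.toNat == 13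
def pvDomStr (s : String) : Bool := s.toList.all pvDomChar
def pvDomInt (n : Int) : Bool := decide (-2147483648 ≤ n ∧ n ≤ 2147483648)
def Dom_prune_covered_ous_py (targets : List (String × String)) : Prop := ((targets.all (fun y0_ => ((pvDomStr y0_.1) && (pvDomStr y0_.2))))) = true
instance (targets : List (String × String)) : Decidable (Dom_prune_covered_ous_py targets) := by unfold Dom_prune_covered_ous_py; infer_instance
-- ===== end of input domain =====

-- B: instead of A's per-DN endswith test against every other DN, scan each lowered DN once and
-- probe its comma-boundary suffixes against a set of all lowered DNs (alternative algorithm).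

-- ===== PORT A =====
def prune_covered_ous_py (targets : List (String × String)) : List (String × String) :=
  let target_dns : PySem.Set String := PySem.Set.ofList (targets.map (fun p => PySem.Str.lower p.1))
  targets.foldl (fun pruned p =>
    let dn_lower := PySem.Str.lower p.1
    let is_covered := target_dns.any (fun other_dn =>
      (dn_lower != other_dn) && PySem.Str.endswith dn_lower ("," ++ other_dn))
    if !is_covered then pruned ++ [p] else pruned) []

-- ===== PORT B =====
-- port of Source B's _covered: walk the lowered DN; at each comma the remaining text is a
-- candidate ancestor DN (exactly low[i+1:] at the comma index i), tested against the set
def pvCovered (low : List Char) (dn_set : PySem.Set String) : Bool :=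
  match low with
  | [] => false
  | ch :: rest => (ch == ',' && dn_set.contains (String.ofList rest)) || pvCovered rest dn_set

def prune_covered_ous_py_alt (targets : List (String × String)) : List (String × String) :=
  let dn_set : PySem.Set String := PySem.Set.ofList (targets.map (fun p => PySem.Str.lower p.1))
  targets.filter (fun p => ! pvCovered (PySem.Str.lower p.1).toList dn_set)

-- ===== PRECONDITION & SPEC =====
def Spec_prune_covered_ous_py (targets : List (String × String)) (out : List (String × String)) : Prop := out = prune_covered_ous_py_alt targets
instance (targets : List (String × String)) (out : List (String × String)) : Decidable (Spec_prune_covered_ous_py targets out) := by unfold Spec_prune_covered_ous_py; infer_instance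

-- ===== CLAIM (what is proved, stated in full; the proofs are below) =====
def Claim_equal_prune_covered_ous_py : Prop := ∀ (targets : List (String × String)), Dom_prune_covered_ous_py targets → Spec_prune_covered_ous_py targets (prune_covered_ous_py targets)

-- ===== LEMMAS AND PROOFS =====

theorem pvCovered_iff (S : PySem.Set String) (l : List Char) :
    pvCovered l S = true ↔ ∃ rest, String.ofList rest ∈ S ∧ (',' :: rest) <:+ l := by
  induction l with
  | nil => simp [pvCovered]
  | cons c rest ih =>
    simp only [pvCovered, Bool.or_eq_true, Bool.and_eq_true, beq_iff_eq,
      PySem.Set.contains_iff, ih]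
    constructor
    · rintro (⟨hc, hm⟩ | ⟨r, hm, hs⟩)
      · exact ⟨rest, hm, by rw [hc]⟩
      · exact ⟨r, hm, List.suffix_cons_iff.mpr (Or.inr hs)⟩
    · rintro ⟨r, hm, hs⟩
      rcases List.suffix_cons_iff.mp hs with h | h
      · obtain ⟨hc, hr⟩ := List.cons.injEq _ _ _ _ ▸ h
        exact Or.inl ⟨hc.symm, hr ▸ hm⟩
      · exact Or.inr ⟨r, hm, h⟩

theorem covered_eq (S : PySem.Set String) (s : String) :
    S.any (fun o => (s != o) && PySem.Str.endswith s ("," ++ o)) = pvCovered s.toList S := by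
  rw [Bool.eq_iff_iff, List.any_eq_true, pvCovered_iff]
  constructor
  · rintro ⟨o, hm, h⟩
    simp only [Bool.and_eq_true, bne_iff_ne, ne_eq, PySem.Str.endswith_eq,
      PySem.Chars.endswith_iff, String.toList_append] at h
    refine ⟨o.toList, ?_, ?_⟩
    · simpa using hm
    · simpa using h.2
  · rintro ⟨r, hm, hs⟩
    refine ⟨String.ofList r, hm, ?_⟩
    simp only [Bool.and_eq_true, bne_iff_ne, ne_eq, PySem.Str.endswith_eq,
      PySem.Chars.endswith_iff, String.toList_append]
    constructor
    · intro he
      have ht : s.toList = r := by rw [he]; simp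
      have hlen := hs.length_le
      rw [ht] at hlen
      simp at hlen
    · simpa using hs

-- ===== VERDICT (by name: the statement is the Claim_ definition above) =====
theorem prune_covered_ous_py_spec : Claim_equal_prune_covered_ous_py := by
  intro targets _
  show prune_covered_ous_py targets = prune_covered_ous_py_alt targets
  simp only [prune_covered_ous_py, prune_covered_ous_py_alt, covered_eq]
  simpa using PySem.List.foldl_append_if
    (fun p : String × String => ! pvCovered (PySem.Str.lower p.1).toList
      (PySem.Set.ofList (targets.map (fun p => PySem.Str.lower p.1)))) id targets []
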